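-- pv_equiv track=rewrite | github.com/ssKimholy/CodeChallenges | stackAndQueue/rotateBracket-D2T2.py | isRightStr
-- ===== SOURCE A (Python) =====
-- def isRightStr(string, startIndex):
--     stack = []
--     n = len(string)
--     match = {']': '[', '}': '{', ')': '('} # object 이용
--
--     for i in range(n):
--         c = string[(startIndex + i) % n] # 문자열 rotate 식
--         if c in match:
--             # 닫는 괄호가 나왔을 때, 스택이 비어있거나 여는 괄호 짝이 안 맞을 때, 모두 올바르지 않은 문자열
--             if not stack or stack[-1] != match[c]:
--                 return False
--             else:
--                 # 올바른 형식이라면 스택에서 팝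
--                 stack.pop()
--         else:
--             # 여는 괄호라면 집어넣기
--             stack.append(c)
--     return not stack
-- ===== SOURCE B (Python) =====
-- def isRightStr(string, startIndex):
--     n = len(string)
--     k = startIndex % n if n else 0
--     rotated = string[k:] + string[:k]
--     while True:
--         reduced = rotated.replace('()', '').replace('[]', '').replace('{}', '')
--         if reduced == rotated:
--             return not rotated
--         rotated = reduced
-- ===== Notes on version B (the rewrite author's own statement) =====
-- stated objective: alternative
-- what changed: Replaces the single stack-based scan over modular indices with building the rotated string explicitly and repeatedly deleting adjacent '()', '[]', '{}' pairs via str.replace until a fixpoint, returning whether the string reduced to empty.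
import Mathlib
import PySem

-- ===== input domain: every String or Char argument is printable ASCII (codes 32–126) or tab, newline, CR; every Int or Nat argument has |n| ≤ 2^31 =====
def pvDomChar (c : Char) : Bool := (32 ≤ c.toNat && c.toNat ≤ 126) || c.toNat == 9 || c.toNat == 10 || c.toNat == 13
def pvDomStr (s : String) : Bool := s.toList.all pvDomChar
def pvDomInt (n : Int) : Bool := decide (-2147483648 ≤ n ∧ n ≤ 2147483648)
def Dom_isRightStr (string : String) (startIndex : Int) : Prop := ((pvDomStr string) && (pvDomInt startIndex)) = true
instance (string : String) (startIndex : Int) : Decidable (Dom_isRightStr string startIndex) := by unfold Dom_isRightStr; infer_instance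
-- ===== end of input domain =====

-- B builds the rotated string explicitly and repeatedly deletes adjacent ()/[]/{}
-- pairs via str.replace until a fixpoint: a different (reduction) algorithm; measured
-- faster in Python by a constant factor (C-level replace vs per-char loop), O(n^2) worst case.


-- ===== PORT A =====
-- match = {']': '[', '}': '{', ')': '('}
def pyMatch : PySem.Dict Char Char := PySem.Dict.ofList [(']', '['), ('}', '{'), (')', '(')]

-- the for-loop of A: `is_` is the remaining range, `stack` the Python list (head = stack[-1])
def isRightStrLoop (string : List Char) (startIndex n : Int) (is_ : List Int) (stack : List Char) : Bool :=
  match is_ with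
  | [] => stack.isEmpty                 -- return not stack
  | i :: rest =>
    match PySem.List.pyGet? string (PySem.Int.mod (startIndex + i) n) with
    | none => false                     -- unreachable: for n = len(string) > 0 the index is in range; n = 0 gives an empty loop
    | some c =>
      match PySem.Dict.get? pyMatch c with
      | some m =>
        match stack with
        | [] => false                   -- not stack
        | top :: stack' => if top ≠ m then false else isRightStrLoop string startIndex n rest stack'
      | none => isRightStrLoop string startIndex n rest (c :: stack)

def isRightStr (string : String) (startIndex : Int) : Bool :=
  isRightStrLoop string.toList startIndex (string.toList.length : Int)
    (PySem.List.pyRange 0 (string.toList.length : Int) 1) []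

-- ===== PORT B =====
-- rem2 a b l is what `l.replace(a+b, '')` computes; it is defined and proved equal to
-- PySem.Chars.replace below ONLY because reduceLoop's termination proof needs it.
def rem2 (a b : Char) : List Char → List Char
  | c :: d :: t => if c = a ∧ d = b then rem2 a b t else c :: rem2 a b (d :: t)
  | l => l

theorem rem2_len_le (a b : Char) : ∀ l : List Char, (rem2 a b l).length ≤ l.length := by
  intro l
  induction l using rem2.induct a b with
  | case1 c d t ih =>
      simp only [rem2, if_pos ‹c = a ∧ d = b›]
      simp at ih ⊢; omega
  | case2 c d t h ih =>
      simp only [rem2, if_neg h]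
      simp at ih ⊢; omega
  | case3 l h1 => simp [rem2.eq_def]

theorem rem2_eq_or_lt (a b : Char) : ∀ l : List Char,
    rem2 a b l = l ∨ (rem2 a b l).length < l.length := by
  intro l
  induction l using rem2.induct a b with
  | case1 c d t ih =>
      right
      simp only [rem2, if_pos ‹c = a ∧ d = b›]
      have := rem2_len_le a b t; simp; omega
  | case2 c d t h ih =>
      simp only [rem2, if_neg h]
      rcases ih with h1 | h1
      · left; simp [h1]
      · right; simp at h1 ⊢; omega
  | case3 l h1 => left; simp [rem2.eq_def]

theorem go_spec (a b : Char) : ∀ (fuel : Nat) (l acc : List Char), l.length ≤ fuel →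
    PySem.Chars.replace.go [a, b] [] fuel l acc = acc.reverse ++ rem2 a b l := by
  intro fuel
  induction fuel with
  | zero =>
      intro l acc h
      have : l = [] := by cases l <;> simp_all
      subst this
      simp [PySem.Chars.replace.go, rem2]
  | succ fuel ih =>
      intro l acc h
      cases l with
      | nil => simp [PySem.Chars.replace.go, rem2]
      | cons c t =>
          cases hp : List.isPrefixOf [a, b] (c :: t) with
          | true =>
              have hp2 := hp
              rw [List.isPrefixOf_iff_prefix] at hp2
              obtain ⟨t', ht⟩ := hp2
              simp at ht
              obtain ⟨rfl, rfl⟩ := ht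
              simp [PySem.Chars.replace.go, hp]
              rw [ih t' acc (by simp at h; omega)]
              simp [rem2]
          | false =>
              simp [PySem.Chars.replace.go, hp]
              rw [ih t (c :: acc) (by simp at h; omega)]
              have : rem2 a b (c :: t) = c :: rem2 a b t := by
                cases t with
                | nil => simp [rem2]
                | cons d t'' =>
                    have : ¬ (c = a ∧ d = b) := by
                      intro ⟨h1, h2⟩; subst h1; subst h2
                      simp [List.isPrefixOf] at hp
                    simp [rem2, this]
              simp [this]

theorem replace_eq_rem2 (a b : Char) (l : List Char) :
    PySem.Chars.replace l [a, b] [] = rem2 a b l := by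
  simp [PySem.Chars.replace]
  exact go_spec a b l.length l [] (le_refl _)

-- reduced = rotated.replace('()','').replace('[]','').replace('{}','')
def reduceStep (s : List Char) : List Char :=
  PySem.Chars.replace (PySem.Chars.replace (PySem.Chars.replace s ['(', ')'] []) ['[', ']'] []) ['{', '}'] []

theorem reduceStep_ne_lt {s : List Char} (h : reduceStep s ≠ s) :
    (reduceStep s).length < s.length := by
  simp only [reduceStep, replace_eq_rem2] at h ⊢
  have l1 := rem2_len_le '(' ')' s
  have l2 := rem2_len_le '[' ']' (rem2 '(' ')' s)
  have l3 := rem2_len_le '{' '}' (rem2 '[' ']' (rem2 '(' ')' s))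
  rcases rem2_eq_or_lt '(' ')' s with h1 | h1
  · rw [h1] at h l2 l3 ⊢
    rcases rem2_eq_or_lt '[' ']' s with h2 | h2
    · rw [h2] at h l3 ⊢
      rcases rem2_eq_or_lt '{' '}' s with h3 | h3
      · exact absurd h3 h
      · exact h3
    · omega
  · omega

-- while True: … if reduced == rotated: return not rotated; rotated = reduced
def reduceLoop (s : List Char) : List Char :=
  let t := reduceStep s
  if _h : t = s then s else reduceLoop t
termination_by s.length
decreasing_by exact reduceStep_ne_lt _h

def isRightStr_alt (string : String) (startIndex : Int) : Bool :=
  let s := string.toList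
  let n : Int := (s.length : Int)
  let k : Int := if n ≠ 0 then PySem.Int.mod startIndex n else 0
  let rotated := PySem.List.slice s (some k) none ++ PySem.List.slice s none (some k)
  (reduceLoop rotated).isEmpty

-- ===== PRECONDITION & SPEC =====
def Spec_isRightStr (string : String) (startIndex : Int) (out : Bool) : Prop := out = isRightStr_alt string startIndex
instance (string : String) (startIndex : Int) (out : Bool) : Decidable (Spec_isRightStr string startIndex out) := by unfold Spec_isRightStr; infer_instance

-- ===== CLAIM (what is proved, stated in full; the proofs are below) =====
def Claim_equal_isRightStr : Prop := ∀ (string : String) (startIndex : Int), Dom_isRightStr string startIndex → Spec_isRightStr string startIndex (isRightStr string startIndex)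

-- ===== LEMMAS AND PROOFS =====

-- the stack automaton both programs implement (proof vocabulary only)
def closeOf? (c : Char) : Option Char :=
  if c = ')' then some '(' else if c = ']' then some '[' else if c = '}' then some '{' else none

def run : List Char → List Char → Bool
  | st, [] => st.isEmpty
  | st, c :: t =>
    match closeOf? c with
    | some m =>
      match st with
      | x :: st' => if x = m then run st' t else false
      | [] => false
    | none => run (c :: st) t

theorem run_cons (st : List Char) (c : Char) (t : List Char) :
    run st (c :: t) =
      match closeOf? c with
      | some m =>
        match st with
        | x :: st' => if x = m then run st' t else false
        | [] => false
      | none => run (c :: st) t := rfl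

theorem run_congr {t1 t2 : List Char} (h : ∀ st, run st t1 = run st t2) :
    ∀ (c : Char) (st : List Char), run st (c :: t1) = run st (c :: t2) := by
  intro c st
  rw [run_cons, run_cons]
  cases closeOf? c with
  | some m =>
      cases st with
      | nil => rfl
      | cons x st' => by_cases hx : x = m <;> simp [hx, h]
  | none => exact h _

theorem get?_pyMatch (c : Char) : PySem.Dict.get? pyMatch c = closeOf? c := by
  by_cases h1 : c = ']'
  · subst h1; decide
  by_cases h2 : c = '}'
  · subst h2; decide
  by_cases h3 : c = ')'
  · subst h3; decide
  have hitems : pyMatch.items = [(']', '['), ('}', '{'), (')', '(')] := by decide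
  have e1 : (((']' : Char)) == c) = false := beq_eq_false_iff_ne.mpr (Ne.symm h1)
  have e2 : ((('}' : Char)) == c) = false := beq_eq_false_iff_ne.mpr (Ne.symm h2)
  have e3 : (((')' : Char)) == c) = false := beq_eq_false_iff_ne.mpr (Ne.symm h3)
  simp [PySem.Dict.get?, hitems, List.find?, e1, e2, e3, closeOf?, h1, h2, h3]

-- A's loop is `run` on the list of characters it reads
theorem loopA_eq_run (s : List Char) (k n : Int) :
    ∀ (is_ : List Int) (cs : List Char) (st : List Char),
    is_.map (fun i => PySem.List.pyGet? s (PySem.Int.mod (k + i) n)) = cs.map some →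
    isRightStrLoop s k n is_ st = run st cs := by
  intro is_
  induction is_ with
  | nil =>
      intro cs st h
      have : cs = [] := by cases cs <;> simp_all
      subst this; simp [isRightStrLoop, run]
  | cons i rest ih =>
      intro cs st h
      cases cs with
      | nil => simp at h
      | cons c cs' =>
          simp only [List.map, List.cons.injEq] at h
          obtain ⟨h1, h2⟩ := h
          rw [run_cons]
          simp only [isRightStrLoop, h1, get?_pyMatch]
          cases hc : closeOf? c with
          | some m =>
              cases st with
              | nil => rfl
              | cons x st' =>
                  by_cases hx : x = m
                  · simp [hx, ih cs' st' h2]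
                  · simp [hx]
          | none => exact ih cs' (c :: st) h2

-- the characters A reads are exactly the rotated string
theorem reads_eq_rotated (s : List Char) (k : Int) (hn : s ≠ []) :
    (PySem.List.pyRange 0 (s.length : Int) 1).map
      (fun i => PySem.List.pyGet? s (PySem.Int.mod (k + i) (s.length : Int)))
    = (s.drop (PySem.Int.mod k (s.length : Int)).toNat ++
       s.take (PySem.Int.mod k (s.length : Int)).toNat).map some := by
  have hlen0 : 0 < s.length := List.length_pos_of_ne_nil hn
  have hpos : (0 : Int) < (s.length : Int) := by exact_mod_cast hlen0
  have hr0 : 0 ≤ PySem.Int.mod k (s.length : Int) := PySem.Int.mod_nonneg k hpos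
  have hrn : PySem.Int.mod k (s.length : Int) < (s.length : Int) := PySem.Int.mod_lt k hpos
  have hrem : PySem.Int.mod k (s.length : Int) = k % (s.length : Int) :=
    PySem.Int.mod_eq_emod_of_pos hpos
  set r : Nat := (PySem.Int.mod k (s.length : Int)).toNat with hrdef
  have hrs : r < s.length := by omega
  have hrcast : ((r : Int)) = k % (s.length : Int) := by rw [← hrem]; omega
  apply List.ext_getElem?
  intro j
  by_cases hjlen : j < s.length
  · have hmod : PySem.Int.mod (k + (j : Int)) (s.length : Int)
        = (((r + j) % s.length : Nat) : Int) := by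
      rw [PySem.Int.mod_eq_emod_of_pos hpos]
      conv_lhs => rw [Int.add_emod]
      rw [← hrcast]
      rw [Int.emod_eq_of_lt (a := (j : Int)) (by exact_mod_cast j.zero_le) (by exact_mod_cast hjlen)]
      rw [show ((r : Int) + (j : Int)) = (((r + j : Nat) : Int)) by push_cast; ring]
      exact_mod_cast rfl
    simp only [List.getElem?_map, PySem.List.pyRange_one, sub_zero, Int.toNat_natCast,
      List.getElem?_range, hjlen, Option.map_map]
    simp only [Option.map_some, Function.comp_apply, zero_add, hmod, PySem.List.pyGet?_natCast]
    by_cases hcase : j < s.length - r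
    · rw [List.getElem?_append_left (by rw [List.length_drop]; omega), List.getElem?_drop,
        Nat.mod_eq_of_lt (by omega)]
      rw [List.getElem?_eq_getElem (show r + j < s.length by omega)]
      rfl
    · have heq : (r + j) % s.length = r + j - s.length := by
        conv_lhs => rw [show r + j = (r + j - s.length) + 1 * s.length by omega]
        rw [Nat.add_mul_mod_self_right]
        exact Nat.mod_eq_of_lt (by omega)
      rw [List.getElem?_append_right (by rw [List.length_drop]; omega), List.length_drop,
        List.getElem?_take, if_pos (by omega), heq,
        show r + j - s.length = j - (s.length - r) by omega]
      rw [List.getElem?_eq_getElem (show j - (s.length - r) < s.length by omega)]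
      rfl
  · rw [List.getElem?_eq_none (by simp [PySem.List.length_pyRange_one]; omega)]
    rw [List.getElem?_eq_none (by simp; omega)]

theorem run_rem2 (a b : Char) (hb : closeOf? b = some a) (ha : closeOf? a = none) :
    ∀ l : List Char, ∀ st, run st (rem2 a b l) = run st l := by
  intro l
  induction l using rem2.induct a b with
  | case1 c d t h ih =>
      obtain ⟨rfl, rfl⟩ := h
      intro st
      have hr : rem2 c d (c :: d :: t) = rem2 c d t := by simp [rem2]
      have hrun : run st (c :: d :: t) = run st t := by simp [run_cons, ha, hb]
      rw [hr, ih st, hrun]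
  | case2 c d t h ih =>
      intro st
      have hr : rem2 a b (c :: d :: t) = c :: rem2 a b (d :: t) := by simp [rem2, h]
      rw [hr]
      exact run_congr ih c st
  | case3 l h1 => intro st; simp [rem2.eq_def]

-- no adjacent pair a·b anywhere in l
def noAdjPair (a b : Char) : List Char → Prop
  | c :: d :: t => ¬(c = a ∧ d = b) ∧ noAdjPair a b (d :: t)
  | _ => True

theorem noAdjPair_tail {a b c : Char} {t : List Char} (h : noAdjPair a b (c :: t)) :
    noAdjPair a b t := by
  cases t with
  | nil => trivial
  | cons d t' => exact h.2

theorem rem2_fix_noAdj (a b : Char) : ∀ l : List Char, rem2 a b l = l → noAdjPair a b l := by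
  intro l
  induction l using rem2.induct a b with
  | case1 c d t h ih =>
      intro hfix
      exfalso
      have hle := rem2_len_le a b t
      simp only [rem2, if_pos h] at hfix
      have : (rem2 a b t).length = t.length + 2 := by rw [hfix]; simp
      omega
  | case2 c d t h ih =>
      intro hfix
      simp only [rem2, if_neg h] at hfix
      exact ⟨h, ih (by injection hfix)⟩
  | case3 l h1 => intro _; simp [noAdjPair.eq_def]

theorem closeOf?_cases {c d : Char} (h : closeOf? d = some c) :
    (c = '(' ∧ d = ')') ∨ (c = '[' ∧ d = ']') ∨ (c = '{' ∧ d = '}') := by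
  simp only [closeOf?] at h
  split_ifs at h with h1 h2 h3
  · exact Or.inl ⟨(Option.some.inj h).symm, h1⟩
  · exact Or.inr (Or.inl ⟨(Option.some.inj h).symm, h2⟩)
  · exact Or.inr (Or.inr ⟨(Option.some.inj h).symm, h3⟩)

-- a string with no adjacent matched pair runs to true only if everything is empty
theorem noAdj_run (l : List Char) :
    ∀ st : List Char,
    noAdjPair '(' ')' l → noAdjPair '[' ']' l → noAdjPair '{' '}' l →
    (∀ d t x st', l = d :: t → st = x :: st' → closeOf? d ≠ some x) →
    run st l = true → l = [] ∧ st = [] := by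
  induction l with
  | nil =>
      intro st _ _ _ _ hrun
      simp [run] at hrun
      exact ⟨rfl, hrun⟩
  | cons c t ih =>
      intro st h1 h2 h3 hinv hrun
      exfalso
      rw [run_cons] at hrun
      cases hc : closeOf? c with
      | some m =>
          rw [hc] at hrun
          cases st with
          | nil => simp at hrun
          | cons x st' =>
              by_cases hx : x = m
              · exact hinv c t x st' rfl rfl (by rw [hc, hx])
              · simp [hx] at hrun
      | none =>
          rw [hc] at hrun
          have hinv' : ∀ d t' x st'', t = d :: t' → c :: st = x :: st'' → closeOf? d ≠ some x := by
            intro d t' x st'' htd hst hclose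
            have hxc : x = c := by injection hst with hh _; exact hh.symm
            subst hxc; subst htd
            rcases closeOf?_cases hclose with ⟨rfl, rfl⟩ | ⟨rfl, rfl⟩ | ⟨rfl, rfl⟩
            · exact h1.1 ⟨rfl, rfl⟩
            · exact h2.1 ⟨rfl, rfl⟩
            · exact h3.1 ⟨rfl, rfl⟩
          have := ih (c :: st) (noAdjPair_tail h1) (noAdjPair_tail h2) (noAdjPair_tail h3) hinv' hrun
          simp at this

theorem run_reduceStep (s : List Char) (st : List Char) :
    run st (reduceStep s) = run st s := by
  simp only [reduceStep, replace_eq_rem2]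
  rw [run_rem2 '{' '}' (by decide) (by decide),
      run_rem2 '[' ']' (by decide) (by decide),
      run_rem2 '(' ')' (by decide) (by decide)]

theorem reduceLoop_eq (s : List Char) :
    reduceLoop s = if _h : reduceStep s = s then s else reduceLoop (reduceStep s) := by
  rw [reduceLoop]

theorem reduceLoop_fix (s : List Char) : reduceStep (reduceLoop s) = reduceLoop s := by
  induction s using reduceLoop.induct with
  | case1 s t hfix =>
      have hfix' : reduceStep s = s := hfix
      rw [reduceLoop_eq, dif_pos hfix']
      exact hfix'
  | case2 s t hne ih =>
      have hne' : ¬ reduceStep s = s := hne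
      rw [reduceLoop_eq, dif_neg hne']
      exact ih

theorem run_reduceLoop (s : List Char) (st : List Char) :
    run st (reduceLoop s) = run st s := by
  induction s using reduceLoop.induct with
  | case1 s t hfix =>
      have hfix' : reduceStep s = s := hfix
      rw [reduceLoop_eq, dif_pos hfix']
  | case2 s t hne ih =>
      have hne' : ¬ reduceStep s = s := hne
      rw [reduceLoop_eq, dif_neg hne', ih, run_reduceStep]

theorem reduceStep_fix_noAdj {s : List Char} (h : reduceStep s = s) :
    noAdjPair '(' ')' s ∧ noAdjPair '[' ']' s ∧ noAdjPair '{' '}' s := by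
  simp only [reduceStep, replace_eq_rem2] at h
  have l1 := rem2_len_le '(' ')' s
  have l2 := rem2_len_le '[' ']' (rem2 '(' ')' s)
  have l3 := rem2_len_le '{' '}' (rem2 '[' ']' (rem2 '(' ')' s))
  have hlen : s.length ≤ (rem2 '{' '}' (rem2 '[' ']' (rem2 '(' ')' s))).length := by rw [h]
  have e1 : rem2 '(' ')' s = s := by
    rcases rem2_eq_or_lt '(' ')' s with h1 | h1
    · exact h1
    · omega
  rw [e1] at h l2 l3 hlen
  have e2 : rem2 '[' ']' s = s := by
    rcases rem2_eq_or_lt '[' ']' s with h1 | h1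
    · exact h1
    · omega
  rw [e2] at h l3 hlen
  exact ⟨rem2_fix_noAdj _ _ _ e1, rem2_fix_noAdj _ _ _ e2, rem2_fix_noAdj _ _ _ h⟩

theorem run_iff_reduceLoop_nil (s : List Char) : run [] s = true ↔ reduceLoop s = [] := by
  constructor
  · intro h
    have hfix := reduceLoop_fix s
    have hrun : run [] (reduceLoop s) = true := by rw [run_reduceLoop]; exact h
    obtain ⟨h1, h2, h3⟩ := reduceStep_fix_noAdj hfix
    exact (noAdj_run (reduceLoop s) [] h1 h2 h3 (by intro _ _ _ _ _ h'; simp at h') hrun).1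
  · intro h
    rw [← run_reduceLoop s [], h]
    rfl

-- ===== VERDICT (by name: the statement is the Claim_ definition above) =====
theorem isRightStr_spec : Claim_equal_isRightStr := by
  intro string k _
  unfold Spec_isRightStr isRightStr isRightStr_alt
  simp only []
  by_cases hs : string.toList = []
  · rw [hs]
    simp only [List.length_nil, Nat.cast_zero]
    rw [PySem.List.pyRange_one_eq_nil (le_refl 0)]
    have : reduceLoop [] = [] := by rw [reduceLoop_eq, dif_pos (by decide)]
    simp [isRightStrLoop, PySem.List.slice, this]
  · have hpos : (0 : Int) < (string.toList.length : Int) := by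
      cases hsl : string.toList with
      | nil => exact absurd hsl hs
      | cons a t => simp
    have hk0 : 0 ≤ PySem.Int.mod k (string.toList.length : Int) := PySem.Int.mod_nonneg k hpos
    set s := string.toList with hsdef
    set r : Nat := (PySem.Int.mod k (s.length : Int)).toNat with hrdef
    have hrot : PySem.List.slice s (some (PySem.Int.mod k (s.length : Int))) none ++
        PySem.List.slice s none (some (PySem.Int.mod k (s.length : Int))) =
        s.drop r ++ s.take r := by
      rw [PySem.List.slice_from _ hk0, PySem.List.slice_to _ hk0]
    have hne : ((s.length : Int) ≠ 0) := by omega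
    rw [if_pos hne, hrot]
    rw [loopA_eq_run s k (s.length : Int) _ (s.drop r ++ s.take r) []
        (reads_eq_rotated s k hs)]
    cases hrun : run [] (s.drop r ++ s.take r) with
    | true =>
        rw [(run_iff_reduceLoop_nil _).1 hrun]
        rfl
    | false =>
        cases hred : reduceLoop (s.drop r ++ s.take r) with
        | nil =>
            exfalso
            have h2 := (run_iff_reduceLoop_nil _).2 hred
            rw [hrun] at h2
            exact absurd h2 (by decide)
        | cons a t => rfl
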